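-- pv_equiv track=rewrite | github.com/sunyeongchoi/sydsyd_challenge | argorithm/nf_test3.py | solution
-- ===== SOURCE A (Python) =====
-- def solution(A):
--     answer = []
--     sumval=0
--     for i in A:
--         if i<0:
--             answer.append(sumval)
--             sumval=0
--         else:
--             sumval+=i
--     answer.append(sumval)
--     return max(answer)
-- ===== SOURCE B (Python) =====
-- def solution(A):
--     # Divide and conquer: each segment is summarized by
--     # (best run sum, prefix run sum, suffix run sum, all-non-negative?, total),
--     # and two adjacent summaries combine in O(1) (the crossing run is ls+rp).
--     def summarize(lo, hi):
--         if lo == hi: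
--             return (0, 0, 0, True, 0)
--         if hi - lo == 1:
--             x = A[lo]
--             return (0, 0, 0, False, x) if x < 0 else (x, x, x, True, x)
--         mid = (lo + hi) // 2
--         lb, lp, ls, lf, lt = summarize(lo, mid)
--         rb, rp, rs, rf, rt = summarize(mid, hi)
--         return (max(lb, rb, ls + rp),
--                 lt + rp if lf else lp,
--                 rt + ls if rf else rs,
--                 lf and rf,
--                 lt + rt)
--     return summarize(0, len(A))[0]
-- ===== Notes on version B (the rewrite author's own statement) =====
-- stated objective: alternative
-- what changed: B replaces A's left-to-right running-sum-with-reset loop by a divide-and-conquer recursion: each half is summarized as (best run sum, prefix run, suffix run, all-non-negative flag, total) and the summaries are merged in O(1), the crossing run being suffix(left)+prefix(right).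
import Mathlib
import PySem

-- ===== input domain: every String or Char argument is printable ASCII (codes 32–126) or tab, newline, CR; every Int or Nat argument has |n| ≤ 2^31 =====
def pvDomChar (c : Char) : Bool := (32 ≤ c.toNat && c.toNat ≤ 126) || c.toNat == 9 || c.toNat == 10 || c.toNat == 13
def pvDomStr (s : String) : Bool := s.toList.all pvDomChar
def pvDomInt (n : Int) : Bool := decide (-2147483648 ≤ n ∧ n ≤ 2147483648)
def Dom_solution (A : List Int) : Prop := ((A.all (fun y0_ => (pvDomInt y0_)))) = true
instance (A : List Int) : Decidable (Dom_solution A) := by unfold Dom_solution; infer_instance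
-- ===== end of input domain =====

-- B replaces A's running-sum-with-reset loop by a divide-and-conquer over segment
-- summaries (best/prefix/suffix run sums, full flag, total): alternative, same cost.


-- ===== PORT A =====
-- the for-loop over A with state (answer, sumval)
def solLoop (A : List Int) : List Int × Int :=
  A.foldl (fun st i => if i < 0 then (st.1 ++ [st.2], 0) else (st.1, st.2 + i)) ([], 0)

def solution (A : List Int) : Int :=
  -- max(answer) after the final append; the list (solLoop A).1 ++ [(solLoop A).2]
  -- is never empty, so Python's max never raises and the `none` branch is unreachable
  match PySem.List.max? ((solLoop A).1 ++ [(solLoop A).2]) (fun x => x) with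
  | some v => v
  | none => 0

-- ===== PORT B =====
-- a segment summary: (best run sum, prefix run, suffix run, all-non-negative?, total)
structure Summ where
  best : Int
  pre : Int
  suf : Int
  full : Bool
  total : Int
deriving DecidableEq, Repr

-- the O(1) merge of two adjacent summaries (the tuple B builds from lb..rt)
def dcCombine (L R : Summ) : Summ :=
  ⟨max L.best (max R.best (L.suf + R.pre)),
   if L.full then L.total + R.pre else L.pre,
   if R.full then R.total + L.suf else R.suf,
   L.full && R.full,
   L.total + R.total⟩

-- summarize(lo, hi): B's index pair (lo, hi) on A becomes the sublist A[lo:hi];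
-- splitting at mid = (lo+hi)//2 is splitting the sublist at half its length
def dc : List Int → Summ
  | [] => ⟨0, 0, 0, true, 0⟩
  | [x] => if x < 0 then ⟨0, 0, 0, false, x⟩ else ⟨x, x, x, true, x⟩
  | x :: y :: rest =>
      dcCombine (dc ((x :: y :: rest).take ((x :: y :: rest).length / 2)))
                (dc ((x :: y :: rest).drop ((x :: y :: rest).length / 2)))
  termination_by l => l.length
  decreasing_by
    · simp; omega
    · simp; omega

def solution_alt (A : List Int) : Int := (dc A).best

-- ===== PRECONDITION & SPEC =====
def Spec_solution (A : List Int) (out : Int) : Prop := out = solution_alt A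
instance (A : List Int) (out : Int) : Decidable (Spec_solution A out) := by unfold Spec_solution; infer_instance

-- ===== CLAIM (what is proved, stated in full; the proofs are below) =====
def Claim_equal_solution : Prop := ∀ (A : List Int), Dom_solution A → Spec_solution A (solution A)

-- ===== LEMMAS AND PROOFS =====

-- list-recursive specifications of the five summary fields
def preL : List Int → Int
  | [] => 0
  | x :: xs => if x < 0 then 0 else x + preL xs

def fullL : List Int → Bool
  | [] => true
  | x :: xs => !(decide (x < 0)) && fullL xs

def totalL : List Int → Int
  | [] => 0
  | x :: xs => x + totalL xs

def sufL : List Int → Int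
  | [] => 0
  | x :: xs => if x < 0 then sufL xs else (if fullL xs then x + totalL xs else sufL xs)

def bestL : List Int → Int
  | [] => 0
  | x :: xs => if x < 0 then bestL xs else max (x + preL xs) (bestL xs)

-- basic invariants of the summary fields
theorem summ_inv : ∀ (l : List Int),
    0 ≤ preL l ∧ 0 ≤ sufL l ∧ 0 ≤ bestL l ∧ preL l ≤ bestL l ∧
    (fullL l = true → preL l = totalL l ∧ sufL l = totalL l ∧ bestL l = totalL l) := by
  intro l
  induction l with
  | nil => simp [preL, sufL, bestL, fullL, totalL]
  | cons x xs ih =>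
    obtain ⟨hp, hs, hb, hpb, hf⟩ := ih
    by_cases h : x < 0
    · simp [preL, sufL, bestL, fullL, totalL, h]
      omega
    · simp only [preL, sufL, bestL, fullL, totalL, if_neg h]
      refine ⟨by omega, ?_, by omega, by omega, ?_⟩
      · split
        · next hfull => have := hf hfull; omega
        · exact hs
      · intro hfull
        simp at hfull
        obtain ⟨-, hfx⟩ := hfull
        have := hf hfx
        simp [hfx]
        omega

-- append laws for the five fields
theorem totalL_append : ∀ (l r : List Int), totalL (l ++ r) = totalL l + totalL r := by
  intro l r
  induction l with
  | nil => simp [totalL]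
  | cons x xs ih => simp [totalL, ih]; omega

theorem fullL_append : ∀ (l r : List Int), fullL (l ++ r) = (fullL l && fullL r) := by
  intro l r
  induction l with
  | nil => simp [fullL]
  | cons x xs ih => simp [fullL, ih, Bool.and_assoc]

theorem preL_append : ∀ (l r : List Int),
    preL (l ++ r) = if fullL l then totalL l + preL r else preL l := by
  intro l r
  induction l with
  | nil => simp [fullL, totalL]
  | cons x xs ih =>
    by_cases h : x < 0
    · simp [preL, fullL, h]
    · simp only [List.cons_append, preL, fullL, if_neg h, ih]
      simp [h, totalL]
      split <;> omega

theorem sufL_append : ∀ (l r : List Int),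
    sufL (l ++ r) = if fullL r then totalL r + sufL l else sufL r := by
  intro l r
  induction l with
  | nil =>
    simp only [List.nil_append, sufL]
    split
    · next hfr => have := (summ_inv r).2.2.2.2 hfr; omega
    · rfl
  | cons x xs ih =>
    by_cases h : x < 0
    · simp only [List.cons_append, sufL, if_pos h, ih]
    · simp only [List.cons_append, sufL, if_neg h, ih, fullL_append, totalL_append]
      by_cases hfr : fullL r = true
      · simp [hfr]
        split <;> omega
      · simp [hfr]

theorem bestL_append : ∀ (l r : List Int),
    bestL (l ++ r) = max (bestL l) (max (bestL r) (sufL l + preL r)) := by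
  intro l r
  induction l with
  | nil =>
    have := summ_inv r
    simp only [List.nil_append, bestL, sufL]
    omega
  | cons x xs ih =>
    by_cases h : x < 0
    · simp only [List.cons_append, bestL, sufL, if_pos h, ih]
    · simp only [List.cons_append, bestL, sufL, if_neg h, ih, preL_append]
      have hxs := summ_inv xs
      have hr := summ_inv r
      by_cases hfx : fullL xs = true
      · have := hxs.2.2.2.2 hfx
        simp [hfx]
        omega
      · simp [hfx]

-- the divide-and-conquer recursion computes exactly the five fields
theorem dc_eq : ∀ (l : List Int), dc l = ⟨bestL l, preL l, sufL l, fullL l, totalL l⟩ := by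
  intro l
  induction hn : l.length using Nat.strong_induction_on generalizing l with
  | _ n ih =>
    match l with
    | [] => simp [dc, bestL, preL, sufL, fullL, totalL]
    | [x] =>
      by_cases h : x < 0
      · simp [dc, bestL, preL, sufL, fullL, totalL, h]
      · simp [dc, bestL, preL, sufL, fullL, totalL, h]
        omega
    | x :: y :: rest =>
      rw [dc]
      have hlen : (x :: y :: rest).length = n := hn
      set m := (x :: y :: rest).length / 2 with hm
      have hlen2 : (x :: y :: rest).length = rest.length + 2 := by simp
      have hn' : n = rest.length + 2 := by rw [← hlen, hlen2]
      have hm' : m = (rest.length + 2) / 2 := by rw [hm, hlen2]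
      have h1 : ((x :: y :: rest).take m).length < n := by
        rw [List.length_take, hlen2]; omega
      have h2 : ((x :: y :: rest).drop m).length < n := by
        rw [List.length_drop, hlen2]; omega
      rw [ih _ h1 _ rfl, ih _ h2 _ rfl]
      have hsplit : (x :: y :: rest).take m ++ (x :: y :: rest).drop m = x :: y :: rest :=
        List.take_append_drop m _
      conv_rhs => rw [← hsplit]
      rw [bestL_append, preL_append, sufL_append, fullL_append, totalL_append]
      simp [dcCombine]

-- ===== the A-side characterisation (from the loop to bestL) =====

-- the list of values A appends when started in state (·, s): one entry per negative, plus the final sumval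
def tailEntries : List Int → Int → List Int
  | [], s => [s]
  | x :: xs, s => if x < 0 then s :: tailEntries xs 0 else tailEntries xs (s + x)

-- the maximum of those entries, as a single recursive function
def g : List Int → Int → Int
  | [], s => s
  | x :: xs, s => if x < 0 then max s (g xs 0) else g xs (s + x)

theorem solLoop_entries : ∀ (A ans : List Int) (s : Int),
    (A.foldl (fun st i => if i < 0 then (st.1 ++ [st.2], 0) else (st.1, st.2 + i)) (ans, s)).1
      ++ [(A.foldl (fun st i => if i < 0 then (st.1 ++ [st.2], 0) else (st.1, st.2 + i)) (ans, s)).2]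
      = ans ++ tailEntries A s := by
  intro A
  induction A with
  | nil => intro ans s; simp [tailEntries]
  | cons x xs ih =>
    intro ans s
    by_cases h : x < 0
    · simp only [List.foldl_cons, if_pos h, tailEntries]
      rw [ih (ans ++ [s]) 0]
      simp
    · simp only [List.foldl_cons, tailEntries, if_neg h]
      exact ih ans (s + x)

theorem foldl_max_tailEntries : ∀ (A : List Int) (s c : Int),
    (tailEntries A s).foldl max c = max c (g A s) := by
  intro A
  induction A with
  | nil => intro s c; simp [tailEntries, g]
  | cons x xs ih =>
    intro s c
    by_cases h : x < 0
    · simp only [tailEntries, g, if_pos h, List.foldl_cons]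
      rw [ih 0 (max c s)]
      omega
    · simp only [tailEntries, g, if_neg h]
      exact ih (s + x) c

theorem max?_tailEntries : ∀ (A : List Int) (s : Int),
    PySem.List.max? (tailEntries A s) (fun x => x) = some (g A s) := by
  intro A
  induction A with
  | nil => intro s; simp [tailEntries, g, PySem.List.max?_id_cons]
  | cons x xs ih =>
    intro s
    by_cases h : x < 0
    · simp only [tailEntries, g, if_pos h]
      rw [PySem.List.max?_id_cons]
      rw [foldl_max_tailEntries xs 0 s]
    · simp only [tailEntries, g, if_neg h]
      exact ih (s + x)

-- the loop value in terms of the summary fields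
theorem g_pre_best : ∀ (A : List Int) (s : Int), 0 ≤ s →
    g A s = max (s + preL A) (bestL A) := by
  intro A
  induction A with
  | nil => intro s hs; simp [g, preL, bestL]; omega
  | cons x xs ih =>
    intro s hs
    have hxs := summ_inv xs
    by_cases h : x < 0
    · simp only [g, preL, bestL, if_pos h]
      rw [ih 0 (by omega)]
      omega
    · simp only [g, preL, bestL, if_neg h]
      rw [ih (s + x) (by omega)]
      omega

-- ===== VERDICT (by name: the statement is the Claim_ definition above) =====
theorem solution_spec : Claim_equal_solution := by
  intro A _
  unfold Spec_solution solution solution_alt solLoop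
  rw [solLoop_entries A [] 0]
  simp only [List.nil_append]
  rw [max?_tailEntries A 0]
  rw [dc_eq A]
  show g A 0 = bestL A
  rw [g_pre_best A 0 (le_refl _)]
  have := summ_inv A
  omega
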